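-- pv_equiv track=rewrite | github.com/Dotori0309/AlgoPython | Algorithm divide and conquer technique/mathematical/square_calculation_O(n^2).py | compute_square_C
-- ===== SOURCE A (Python) =====
-- def compute_square_C(n) :	#  알고리즘 C 사용
--     sum = 0
--     count = 0
--     for i in range(n) :	    # i : 0, 1, ... n-1
--         for j in range(n) :	# j : 0, 1, ... n-1
--             sum = sum + 1	# 기본 연산
--             count += 1
--     return sum, count
-- ===== SOURCE B (Python) =====
-- def compute_square_C(n):
--     m = n if n > 0 else 0
--     return m * m, m * m
-- ===== Notes on version B (the rewrite author's own statement) =====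
-- stated objective: faster
-- what changed: Replaced the O(n^2) nested counting loops with the closed form (m*m, m*m) where m = max(n, 0).
import Mathlib
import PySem

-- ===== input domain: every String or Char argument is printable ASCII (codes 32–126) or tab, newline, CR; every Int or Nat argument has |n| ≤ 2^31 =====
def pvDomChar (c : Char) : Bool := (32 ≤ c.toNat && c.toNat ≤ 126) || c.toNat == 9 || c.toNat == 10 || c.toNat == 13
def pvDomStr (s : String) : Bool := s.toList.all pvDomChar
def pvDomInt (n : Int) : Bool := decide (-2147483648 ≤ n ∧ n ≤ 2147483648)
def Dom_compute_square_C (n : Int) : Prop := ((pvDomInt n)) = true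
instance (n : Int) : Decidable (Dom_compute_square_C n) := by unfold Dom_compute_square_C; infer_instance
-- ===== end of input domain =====

-- B computes the result in closed form (max n 0)^2 instead of A's O(n^2) nested counting loops.

-- ===== PORT A =====
def compute_square_C (n : Int) : Int × Int :=
  (PySem.List.pyRange 0 n 1).foldl
    (fun st _i =>
      (PySem.List.pyRange 0 n 1).foldl
        (fun st' _j => (st'.1 + 1, st'.2 + 1)) st)
    (0, 0)

-- ===== PORT B =====
def compute_square_C_alt (n : Int) : Int × Int :=
  let m : Int := if n > 0 then n else 0
  (m * m, m * m)

-- ===== PRECONDITION & SPEC =====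
def Spec_compute_square_C (n : Int) (out : Int × Int) : Prop := out = compute_square_C_alt n
instance (n : Int) (out : Int × Int) : Decidable (Spec_compute_square_C n out) := by unfold Spec_compute_square_C; infer_instance

-- ===== CLAIM (what is proved, stated in full; the proofs are below) =====
def Claim_equal_compute_square_C : Prop := ∀ (n : Int), Dom_compute_square_C n → Spec_compute_square_C n (compute_square_C n)

-- ===== LEMMAS AND PROOFS =====
theorem inner_fold_add {α : Type} (l : List α) (st : Int × Int) :
    l.foldl (fun st' (_ : α) => (st'.1 + 1, st'.2 + 1)) st
      = (st.1 + l.length, st.2 + l.length) := by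
  induction l generalizing st with
  | nil => simp
  | cons a t ih =>
      rw [List.foldl_cons, ih]
      simp only [List.length_cons, Prod.mk.injEq]
      constructor <;> push_cast <;> ring

theorem outer_fold_add {α β : Type} (outer : List α) (inner : List β) (st : Int × Int) :
    outer.foldl
      (fun st (_ : α) => inner.foldl (fun st' (_ : β) => (st'.1 + 1, st'.2 + 1)) st)
      st
      = (st.1 + outer.length * inner.length, st.2 + outer.length * inner.length) := by
  induction outer generalizing st with
  | nil => simp
  | cons a t ih =>
      rw [List.foldl_cons, inner_fold_add, ih]
      simp only [List.length_cons, Prod.mk.injEq]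
      constructor <;> push_cast <;> ring

-- ===== VERDICT (by name: the statement is the Claim_ definition above) =====
theorem compute_square_C_spec : Claim_equal_compute_square_C := by
  intro n _
  show compute_square_C n = compute_square_C_alt n
  unfold compute_square_C compute_square_C_alt
  rw [outer_fold_add]
  simp only [PySem.List.length_pyRange_one]
  by_cases h : n > 0
  · have ht : ((n - 0).toNat : Int) = n := by omega
    rw [ht]
    simp [h]
  · rw [show (n - 0).toNat = 0 from by omega]
    simp [h]
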